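-- pv_equiv track=rewrite | github.com/Carricossauro/Kickstart | 2020/workout.py | addSession
-- ===== SOURCE A (Python) =====
-- def addSession(schedule, N):
--     maxInterval = -1
--     maxI = -1
--     for i in range(N-1):
--         dif = schedule[i+1] - schedule[i]
--         if dif > maxInterval and dif > 1:
--             maxInterval = dif
--             maxI = i
--     if maxInterval == -1:
--         schedule.append(schedule[-1] + 1)
--     else:
--         minToAdd = schedule[maxI] + maxInterval//2
--         schedule.insert(maxI+1, minToAdd)
--     return schedule
-- ===== SOURCE B (Python) =====
-- def addSession(schedule, N):
--     # Divide-and-conquer tournament over the gap indices [lo, hi): returns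
--     # (largest gap schedule[k+1]-schedule[k] for lo <= k < hi, its first index),
--     # ties resolved in favour of the left half (first occurrence).
--     def best(lo, hi):
--         if hi - lo == 1:
--             return schedule[lo + 1] - schedule[lo], lo
--         mid = (lo + hi) // 2
--         p1 = best(lo, mid)
--         p2 = best(mid, hi)
--         return p1 if p1[0] >= p2[0] else p2
--     if N >= 2:
--         g, i = best(0, N - 1)
--         if g > 1:
--             schedule[i + 1:i + 1] = [schedule[i] + g // 2]
--             return schedule
--     schedule.append(schedule[-1] + 1)
--     return schedule
-- ===== Notes on version B (the rewrite author's own statement) =====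
-- stated objective: alternative
-- what changed: Replaced A's sequential forward loop carrying (maxInterval, maxI) running-max state plus list.insert by a divide-and-conquer tournament best(lo, hi) that finds the largest gap and its first index by recursively splitting the gap-index interval in half and letting the left half win ties, then splices the midpoint in with slice assignment.
import Mathlib
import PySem

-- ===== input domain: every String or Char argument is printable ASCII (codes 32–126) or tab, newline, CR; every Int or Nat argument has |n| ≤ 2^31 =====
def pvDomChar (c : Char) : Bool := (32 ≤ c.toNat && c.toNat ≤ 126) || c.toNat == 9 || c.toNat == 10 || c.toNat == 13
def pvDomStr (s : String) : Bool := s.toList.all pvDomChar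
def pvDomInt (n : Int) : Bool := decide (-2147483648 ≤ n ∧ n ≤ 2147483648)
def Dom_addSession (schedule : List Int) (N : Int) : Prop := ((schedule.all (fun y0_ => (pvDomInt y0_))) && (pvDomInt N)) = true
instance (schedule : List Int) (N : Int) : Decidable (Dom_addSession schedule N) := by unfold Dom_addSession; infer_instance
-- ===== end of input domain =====

-- B replaces A's forward running-max index loop + insert by a divide-and-conquer tournament
-- over the gap indices, splicing the midpoint in at the winning index (objective: alternative).
-- Both Pythons mutate `schedule` in place the same way; the equivalence proved is about the return value.

-- ===== PORT A =====
-- pyGetD is exact here: Pre_ guarantees every index Python touches is in range.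
def addSession (schedule : List Int) (N : Int) : List Int :=
  let r := (PySem.List.pyRange 0 (N - 1) 1).foldl
    (fun (s : Int × Int) (i : Int) =>
      let dif := PySem.List.pyGetD schedule (i + 1) 0 - PySem.List.pyGetD schedule i 0
      if dif > s.1 ∧ dif > 1 then (dif, i) else s) (-1, -1)
  if r.1 = -1 then
    schedule ++ [PySem.List.pyGetD schedule (-1) 0 + 1]
  else
    PySem.List.insert schedule (r.2 + 1)
      (PySem.List.pyGetD schedule r.2 0 + PySem.Int.floordiv r.1 2)

-- ===== PORT B =====
-- best(lo, hi): divide-and-conquer tournament over the gap indices [lo, hi).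
-- ('if _h : hi - lo ≤ 1' is a totality guard for the same computation: Python compares
-- 'hi - lo == 1' and is only ever called with hi - lo ≥ 1.)
def bestGap (schedule : List Int) (lo hi : Int) : Int × Int :=
  if _h : hi - lo ≤ 1 then
    (PySem.List.pyGetD schedule (lo + 1) 0 - PySem.List.pyGetD schedule lo 0, lo)
  else
    let mid := PySem.Int.floordiv (lo + hi) 2
    let p1 := bestGap schedule lo mid
    let p2 := bestGap schedule mid hi
    if p1.1 ≥ p2.1 then p1 else p2
termination_by (hi - lo).toNat
decreasing_by
  · have hm : PySem.Int.floordiv (lo + hi) 2 = (lo + hi) / 2 :=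
      PySem.Int.floordiv_eq_ediv_of_pos (by norm_num)
    rw [hm]; omega
  · have hm : PySem.Int.floordiv (lo + hi) 2 = (lo + hi) / 2 :=
      PySem.Int.floordiv_eq_ediv_of_pos (by norm_num)
    rw [hm]; omega

def addSession_alt (schedule : List Int) (N : Int) : List Int :=
  if 2 ≤ N then
    let p := bestGap schedule 0 (N - 1)
    if p.1 > 1 then
      -- schedule[i+1:i+1] = [v] splice, returned value
      PySem.List.slice schedule none (some (p.2 + 1))
        ++ (PySem.List.pyGetD schedule p.2 0 + PySem.Int.floordiv p.1 2)
        :: PySem.List.slice schedule (some (p.2 + 1)) none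
    else schedule ++ [PySem.List.pyGetD schedule (-1) 0 + 1]
  else schedule ++ [PySem.List.pyGetD schedule (-1) 0 + 1]

-- ===== PRECONDITION & SPEC =====
-- A raises (IndexError) when schedule is empty (schedule[-1]) or N > len(schedule)
-- (schedule[i+1]); B raises on exactly the same inputs.
def Pre_addSession (schedule : List Int) (N : Int) : Prop :=
  schedule ≠ [] ∧ N ≤ (schedule.length : Int)
instance (schedule : List Int) (N : Int) : Decidable (Pre_addSession schedule N) := by
  unfold Pre_addSession; infer_instance

def pvWitness_addSession : List Int × Int := ([1, 5], 2)

def Spec_addSession (schedule : List Int) (N : Int) (out : List Int) : Prop := out = addSession_alt schedule N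
instance (schedule : List Int) (N : Int) (out : List Int) : Decidable (Spec_addSession schedule N out) := by unfold Spec_addSession; infer_instance

-- ===== CLAIM (what is proved, stated in full; the proofs are below) =====
def Claim_equal_addSession : Prop := ∀ (schedule : List Int) (N : Int), Dom_addSession schedule N → Pre_addSession schedule N → Spec_addSession schedule N (addSession schedule N)

-- ===== LEMMAS AND PROOFS =====

-- If M is a member of l and an upper bound of l, then max? picks it (value uniqueness).
theorem max?_pin (l : List Int) (M : Int) (hMmem : M ∈ l)
    (hall : ∀ y ∈ l, y ≤ M) : PySem.List.max? l (fun x => x) = some M := by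
  cases h : PySem.List.max? l (fun x => x) with
  | none =>
      rw [PySem.List.max?_eq_none_iff] at h
      subst h; cases hMmem
  | some M' =>
      have h1 := PySem.List.max?_mem h
      have h2 := PySem.List.max?_isMax h M hMmem
      have h3 := hall M' h1
      simp only at h2
      exact congrArg some (by omega)

-- Characterization of A's running-max fold over range(0, n): either no gap > 1 was seen
-- (state stays (-1,-1)), or the state is (M, j) with M the maximum of the diffs table and
-- j the first index of M.
theorem fold_char (f : Int → Int) (n : Nat) :
    (∀ x ∈ (PySem.List.pyRange 0 (n : Int) 1).map f, x ≤ 1) ∧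
      (PySem.List.pyRange 0 (n : Int) 1).foldl
        (fun (s : Int × Int) (i : Int) =>
          let d := f i
          if d > s.1 ∧ d > 1 then (d, i) else s) (-1, -1) = (-1, -1) ∨
    (∃ M : Int, 1 < M ∧
      PySem.List.max? ((PySem.List.pyRange 0 (n : Int) 1).map f) (fun x => x) = some M ∧
      ∃ j : Nat, PySem.List.index? ((PySem.List.pyRange 0 (n : Int) 1).map f) M = some j ∧
        (PySem.List.pyRange 0 (n : Int) 1).foldl
          (fun (s : Int × Int) (i : Int) =>
            let d := f i
            if d > s.1 ∧ d > 1 then (d, i) else s) (-1, -1) = (M, (j : Int))) := by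
  induction n with
  | zero =>
      left
      simp [PySem.List.pyRange_one_eq_nil]
  | succ n ih =>
      have hsplit : PySem.List.pyRange 0 (((n : Nat) + 1 : Nat) : Int) 1
          = PySem.List.pyRange 0 (n : Int) 1 ++ [(n : Int)] := by
        push_cast
        exact PySem.List.pyRange_one_succ_right (by positivity)
      rw [hsplit]
      simp only [List.map_append, List.map_cons, List.map_nil, List.foldl_append,
        List.foldl_cons, List.foldl_nil]
      rcases ih with ⟨hle, hr⟩ | ⟨M, hM, hmax, j, hidx, hr⟩
      · rw [hr]
        by_cases hd : f n > 1
        · right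
          refine ⟨f n, hd, ?_, ((PySem.List.pyRange 0 (n : Int) 1).map f).length, ?_, ?_⟩
          · apply max?_pin
            · simp
            · intro y hy
              rcases List.mem_append.mp hy with h | h
              · exact le_trans (hle y h) (le_of_lt hd)
              · simp at h; omega
          · rw [PySem.List.index?_append_singleton_self]
            intro hmem
            have := hle _ hmem; omega
          · rw [if_pos ⟨show f (n : Int) > -1 by omega, hd⟩]
            have hlen : (((PySem.List.pyRange 0 (n : Int) 1).map f).length : Int) = (n : Int) := by
              rw [List.length_map, PySem.List.length_pyRange_one]; omega
            rw [hlen]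
        · left
          constructor
          · intro x hx
            rcases List.mem_append.mp hx with h | h
            · exact hle x h
            · simp at h; omega
          · rw [if_neg (by rintro ⟨-, h⟩; omega)]
      · have hall : ∀ y ∈ (PySem.List.pyRange 0 (n : Int) 1).map f, y ≤ M := by
          intro y hy; exact PySem.List.max?_isMax hmax y hy
        have hMmem : M ∈ (PySem.List.pyRange 0 (n : Int) 1).map f := PySem.List.max?_mem hmax
        rw [hr]
        by_cases hd : f n > M
        · right
          refine ⟨f n, by omega, ?_, ((PySem.List.pyRange 0 (n : Int) 1).map f).length, ?_, ?_⟩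
          · apply max?_pin
            · simp
            · intro y hy
              rcases List.mem_append.mp hy with h | h
              · exact le_trans (hall y h) (le_of_lt hd)
              · simp at h; omega
          · rw [PySem.List.index?_append_singleton_self]
            intro hmem
            have := hall _ hmem; omega
          · rw [if_pos ⟨hd, by omega⟩]
            have hlen : (((PySem.List.pyRange 0 (n : Int) 1).map f).length : Int) = (n : Int) := by
              rw [List.length_map, PySem.List.length_pyRange_one]; omega
            rw [hlen]
        · right
          refine ⟨M, hM, ?_, j, ?_, ?_⟩
          · apply max?_pin
            · exact List.mem_append.mpr (Or.inl hMmem)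
            · intro y hy
              rcases List.mem_append.mp hy with h | h
              · exact hall y h
              · simp at h; omega
          · rw [PySem.List.index?_append_of_mem _ hMmem]
            exact hidx
          · rw [if_neg (by rintro ⟨h, -⟩; exact hd h)]

-- Characterization of B's tournament: on [lo, hi) it returns the largest gap together
-- with the leftmost index attaining it.
theorem bestGap_spec (s : List Int) (d : Nat) (lo hi : Int)
    (hd : (hi - lo).toNat ≤ d) (hlt : lo < hi) :
    ∃ j : Int, lo ≤ j ∧ j < hi ∧
      bestGap s lo hi = (PySem.List.pyGetD s (j + 1) 0 - PySem.List.pyGetD s j 0, j) ∧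
      (∀ k, lo ≤ k → k < hi →
        PySem.List.pyGetD s (k + 1) 0 - PySem.List.pyGetD s k 0
          ≤ PySem.List.pyGetD s (j + 1) 0 - PySem.List.pyGetD s j 0) ∧
      (∀ k, lo ≤ k → k < j →
        PySem.List.pyGetD s (k + 1) 0 - PySem.List.pyGetD s k 0
          < PySem.List.pyGetD s (j + 1) 0 - PySem.List.pyGetD s j 0) := by
  induction d generalizing lo hi with
  | zero => omega
  | succ d ih =>
      rw [bestGap]
      by_cases hb : hi - lo ≤ 1
      · rw [dif_pos hb]
        refine ⟨lo, le_refl _, hlt, rfl, ?_, ?_⟩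
        · intro k hk1 hk2
          have hkl : k = lo := by omega
          subst hkl
          exact le_refl _
        · intro k hk1 hk2
          omega
      · rw [dif_neg hb]
        have hm : PySem.Int.floordiv (lo + hi) 2 = (lo + hi) / 2 :=
          PySem.Int.floordiv_eq_ediv_of_pos (by norm_num)
        have hrange : lo < PySem.Int.floordiv (lo + hi) 2 ∧ PySem.Int.floordiv (lo + hi) 2 < hi := by
          rw [hm]; omega
        obtain ⟨j1, hj1a, hj1b, he1, hmax1, hfst1⟩ :=
          ih lo (PySem.Int.floordiv (lo + hi) 2) (by rw [hm]; omega) hrange.1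
        obtain ⟨j2, hj2a, hj2b, he2, hmax2, hfst2⟩ :=
          ih (PySem.Int.floordiv (lo + hi) 2) hi (by rw [hm]; omega) hrange.2
        by_cases hcmp : (bestGap s lo (PySem.Int.floordiv (lo + hi) 2)).1
            ≥ (bestGap s (PySem.Int.floordiv (lo + hi) 2) hi).1
        · rw [if_pos hcmp]
          rw [he1, he2] at hcmp
          simp only at hcmp
          refine ⟨j1, hj1a, by omega, he1, ?_, ?_⟩
          · intro k hk1 hk2
            by_cases hkm : k < PySem.Int.floordiv (lo + hi) 2
            · exact hmax1 k hk1 hkm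
            · exact le_trans (hmax2 k (by omega) hk2) hcmp
          · intro k hk1 hk2
            exact hfst1 k hk1 hk2
        · rw [if_neg hcmp]
          rw [he1, he2] at hcmp
          simp only at hcmp
          rw [not_le] at hcmp
          refine ⟨j2, by omega, hj2b, he2, ?_, ?_⟩
          · intro k hk1 hk2
            by_cases hkm : k < PySem.Int.floordiv (lo + hi) 2
            · exact le_trans (hmax1 k hk1 hkm) (le_of_lt hcmp)
            · exact hmax2 k (by omega) hk2
          · intro k hk1 hk2
            by_cases hkm : k < PySem.Int.floordiv (lo + hi) 2
            · exact lt_of_le_of_lt (hmax1 k hk1 hkm) hcmp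
            · exact hfst2 k (by omega) hk2

theorem addSession_eq (schedule : List Int) (N : Int) :
    Pre_addSession schedule N → addSession schedule N = addSession_alt schedule N := by
  rintro ⟨hne, hNlen⟩
  simp only [addSession, addSession_alt]
  by_cases hN2 : 2 ≤ N
  · rw [if_pos hN2]
    have hn' : N - 1 = (((N - 1).toNat : Nat) : Int) := by omega
    set n : Nat := (N - 1).toNat with hn
    rw [hn']
    obtain ⟨j, hj0, hjn, heq, hmaxall, hfirst⟩ :=
      bestGap_spec schedule (n + 1) 0 ((n : Nat) : Int) (by omega) (by omega)
    set F : Int → Int :=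
      fun i => PySem.List.pyGetD schedule (i + 1) 0 - PySem.List.pyGetD schedule i 0 with hF
    have heqF : bestGap schedule 0 ((n : Nat) : Int) = (F j, j) := heq
    have hmaxallF : ∀ k, 0 ≤ k → k < ((n : Nat) : Int) → F k ≤ F j := hmaxall
    have hfirstF : ∀ k, 0 ≤ k → k < j → F k < F j := hfirst
    have hFjmem : F j ∈ (PySem.List.pyRange 0 (n : Int) 1).map F := by
      exact List.mem_map_of_mem (PySem.List.mem_pyRange_one.mpr (by omega))
    rcases fold_char F n with ⟨hle, hr⟩ | ⟨M, hM, hmax, jA, hidx, hr⟩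
    · -- no gap > 1: both append
      rw [hr, if_pos rfl]
      have hFj : F j ≤ 1 := hle _ hFjmem
      rw [heqF]
      rw [if_neg (by simp only; omega)]
    · -- the largest gap is M > 1, first at index jA; B's tournament finds the same pair
      have hMFj : M = F j := by
        obtain ⟨i, hi, hiF⟩ := List.mem_map.mp (PySem.List.max?_mem hmax)
        have hi' := PySem.List.mem_pyRange_one.mp hi
        have h1 : M ≤ F j := by
          rw [← hiF]; exact hmaxallF i (by omega) (by omega)
        have h2 : F j ≤ M := PySem.List.max?_isMax hmax _ hFjmem
        omega
      have hidx' : PySem.List.index? ((PySem.List.pyRange 0 (n : Int) 1).map F) (F j)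
          = some j.toNat := by
        rw [PySem.List.index?_eq_some_iff]
        refine ⟨(PySem.List.pyRange 0 j 1).map F, (PySem.List.pyRange (j + 1) (n : Int) 1).map F,
          ?_, ?_, ?_⟩
        · rw [← List.map_cons, ← List.map_append,
            ← PySem.List.pyRange_one_cons (by omega : j < (n : Int)),
            ← PySem.List.pyRange_one_append 0 j (n : Int) (by omega) (by omega)]
        · rw [List.length_map, PySem.List.length_pyRange_one]; omega
        · intro hmem
          obtain ⟨i, hi, hiF⟩ := List.mem_map.mp hmem
          have hi' := PySem.List.mem_pyRange_one.mp hi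
          have := hfirstF i (by omega) (by omega)
          omega
      have hjA : jA = j.toNat := by
        rw [hMFj] at hidx
        rw [hidx] at hidx'
        exact Option.some_injective _ hidx'
      rw [hr]
      rw [if_neg (by simp only; omega), heqF, if_pos (show F j > 1 by omega)]
      simp only
      rw [hMFj]
      have hcast : (jA : Int) = j := by omega
      rw [hcast]
      have hc : j + 1 = ((j.toNat + 1 : Nat) : Int) := by omega
      rw [hc, PySem.List.insert_natCast schedule (j.toNat + 1) _ (by omega),
        PySem.List.slice_to_natCast schedule (j.toNat + 1),
        PySem.List.slice_from_natCast schedule (j.toNat + 1)]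
  · -- N <= 1: A's range is empty; both append
    rw [if_neg hN2, PySem.List.pyRange_one_eq_nil (by omega)]
    simp

-- ===== VERDICT (by name: the statement is the Claim_ definition above) =====
theorem addSession_spec : Claim_equal_addSession := by
  intro schedule N _ hpre
  exact addSession_eq schedule N hpre
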